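-- pv_equiv track=rewrite | github.com/Cloudsine-weborion/mlx-omni-server | src/mlx_omni_server/chat/openai/openai_adapter.py | _extract_generation_text_from_mlx_vlm_output
-- ===== SOURCE A (Python) =====
-- from typing import Generator, Any, Dict, List, Optional, Tuple
--
-- def _extract_generation_text_from_mlx_vlm_output(output: str) -> str:
--     """Return only the model's generated text from mlx-vlm CLI stdout.
--
--     The CLI prints progress, prompts, and metrics. We heuristically keep the
--     longest contiguous block of lines that are not known metadata prefixes.
--     """
--     if not output:
--         return ""
--
--     lines = [ln.strip() for ln in output.splitlines()]
--     skip_prefixes = (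
--         "Fetching ",
--         "Files:",
--         "Prompt:",
--         "Generation:",
--         "Peak memory:",
--         "Using ",
--         "Calling `python -m mlx_vlm.generate",
--         "WARNING",
--         "INFO",
--         "DEBUG",
--         "==========",
--     )
--
--     segments: List[List[str]] = []
--     current: List[str] = []
--     for ln in lines:
--         if not ln or any(ln.startswith(pfx) for pfx in skip_prefixes):
--             if current:
--                 segments.append(current)
--                 current = []
--             continue
--         current.append(ln)
--     if current:
--         segments.append(current)
--
--     if not segments:
--         return ""
--
--     # Choose the longest text segment assuming it's the actual generation.
--     best = max(segments, key=lambda seg: sum(len(s) for s in seg))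
--     return "\n".join(best).strip()
-- ===== SOURCE B (Python) =====
-- def _extract_generation_text_from_mlx_vlm_output(output: str) -> str:
--     """Single streaming pass: keep a running best segment instead of
--     collecting all segments and taking max afterwards."""
--     skip_prefixes = (
--         "Fetching ",
--         "Files:",
--         "Prompt:",
--         "Generation:",
--         "Peak memory:",
--         "Using ",
--         "Calling `python -m mlx_vlm.generate",
--         "WARNING",
--         "INFO",
--         "DEBUG",
--         "==========",
--     )
--     best, best_len = [], 0
--     cur, cur_len = [], 0
--     for raw in output.splitlines():
--         ln = raw.strip()
--         if not ln or ln.startswith(skip_prefixes):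
--             if cur_len > best_len:
--                 best, best_len = cur, cur_len
--             cur, cur_len = [], 0
--         else:
--             cur.append(ln)
--             cur_len += len(ln)
--     if cur_len > best_len:
--         best = cur
--     return "\n".join(best).strip()
-- ===== Notes on version B (the rewrite author's own statement) =====
-- stated objective: alternative
-- what changed: Instead of collecting every segment into a list and then scanning it with max(key=sum of lengths), B makes one streaming pass that keeps only the current segment with its running length and the best segment seen so far, closing segments with a strict comparison so the first longest segment still wins.
import Mathlib
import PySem

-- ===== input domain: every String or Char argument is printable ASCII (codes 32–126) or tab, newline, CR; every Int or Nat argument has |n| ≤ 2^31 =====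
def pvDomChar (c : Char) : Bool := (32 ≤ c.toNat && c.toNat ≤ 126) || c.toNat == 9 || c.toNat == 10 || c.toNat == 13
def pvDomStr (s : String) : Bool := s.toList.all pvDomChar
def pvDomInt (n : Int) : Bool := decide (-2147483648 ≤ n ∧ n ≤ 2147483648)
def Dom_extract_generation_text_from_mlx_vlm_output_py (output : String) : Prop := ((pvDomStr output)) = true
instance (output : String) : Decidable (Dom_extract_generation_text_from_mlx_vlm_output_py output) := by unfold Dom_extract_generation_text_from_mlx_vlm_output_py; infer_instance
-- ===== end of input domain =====

-- B replaces A's collect-all-segments-then-max pass by a single streaming pass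
-- keeping only the running best segment; same return value, proved equal below.

-- ===== PORT A =====
-- A-side helper: the tuple of metadata prefixes
def pvSkipPrefixesA : List String :=
  ["Fetching ", "Files:", "Prompt:", "Generation:", "Peak memory:", "Using ",
   "Calling `python -m mlx_vlm.generate", "WARNING", "INFO", "DEBUG", "=========="]

-- A-side helper: the body of A's `for ln in lines` loop (state = (segments, current))
def pvStepA (st : List (List String) × List String) (ln : String) :
    List (List String) × List String :=
  if PySem.Str.len ln == 0 || pvSkipPrefixesA.any (fun pfx => PySem.Str.startswith ln pfx) then
    if st.2.isEmpty then st else (st.1 ++ [st.2], [])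
  else
    (st.1, st.2 ++ [ln])

def extract_generation_text_from_mlx_vlm_output_py (output : String) : String :=
  if PySem.Str.len output == 0 then ""
  else
    let lines := (PySem.Str.splitlines output).map PySem.Str.strip
    let res := lines.foldl pvStepA ([], [])
    let segments := if res.2.isEmpty then res.1 else res.1 ++ [res.2]
    if segments.isEmpty then ""
    else
      match PySem.List.max? segments (fun seg => ((seg.map PySem.Str.len).sum : Int)) with
      | some best => PySem.Str.strip (PySem.Str.join "\n" best)
      | none => ""   -- unreachable: segments ≠ []

-- ===== PORT B =====
-- B-side helper: the same prefixes, as Source B declares them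
def pvSkipPrefixesB : List String :=
  ["Fetching ", "Files:", "Prompt:", "Generation:", "Peak memory:", "Using ",
   "Calling `python -m mlx_vlm.generate", "WARNING", "INFO", "DEBUG", "=========="]

-- B-side helper: Source B's loop body (state = (best, best_len, cur, cur_len))
def pvStepB (st : List String × Int × List String × Int) (raw : String) :
    List String × Int × List String × Int :=
  let ln := PySem.Str.strip raw
  if PySem.Str.len ln == 0 || pvSkipPrefixesB.any (fun pfx => PySem.Str.startswith ln pfx) then
    if st.2.2.2 > st.2.1 then (st.2.2.1, st.2.2.2, [], 0) else (st.1, st.2.1, [], 0)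
  else
    (st.1, st.2.1, st.2.2.1 ++ [ln], st.2.2.2 + PySem.Str.len ln)

def extract_generation_text_from_mlx_vlm_output_py_alt (output : String) : String :=
  let st := (PySem.Str.splitlines output).foldl pvStepB ([], 0, [], 0)
  let best := if st.2.2.2 > st.2.1 then st.2.2.1 else st.1
  PySem.Str.strip (PySem.Str.join "\n" best)

-- ===== PRECONDITION & SPEC =====
def Spec_extract_generation_text_from_mlx_vlm_output_py (output : String) (out : String) : Prop := out = extract_generation_text_from_mlx_vlm_output_py_alt output
instance (output : String) (out : String) : Decidable (Spec_extract_generation_text_from_mlx_vlm_output_py output out) := by unfold Spec_extract_generation_text_from_mlx_vlm_output_py; infer_instance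

-- ===== CLAIM (what is proved, stated in full; the proofs are below) =====
def Claim_equal_extract_generation_text_from_mlx_vlm_output_py : Prop := ∀ (output : String), Dom_extract_generation_text_from_mlx_vlm_output_py output → Spec_extract_generation_text_from_mlx_vlm_output_py output (extract_generation_text_from_mlx_vlm_output_py output)

-- ===== LEMMAS AND PROOFS =====

-- total character length of a segment (A's max key, B's running length)
def pvKey (s : List String) : Int := (s.map PySem.Str.len).sum

-- running-best step and fold over a list of segments
def pvBestStep (p : List String × Int) (s : List String) : List String × Int :=
  if pvKey s > p.2 then (s, pvKey s) else p

def pvRunBest (segs : List (List String)) : List String × Int :=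
  segs.foldl pvBestStep ([], 0)

theorem pvSkips_eq : pvSkipPrefixesB = pvSkipPrefixesA := rfl

theorem pvLen_nonneg (s : String) : 0 ≤ PySem.Str.len s := by
  simp [PySem.Str.len_eq]

theorem pvKey_append (c : List String) (x : String) :
    pvKey (c ++ [x]) = pvKey c + PySem.Str.len x := by
  simp [pvKey]

theorem pvKey_pos (c : List String) (hne : ¬ c.isEmpty)
    (h : ∀ x ∈ c, 1 ≤ PySem.Str.len x) : 1 ≤ pvKey c := by
  cases c with
  | nil => simp at hne
  | cons y t =>
    have h1 : 1 ≤ PySem.Str.len y := h y (by simp)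
    have h2 : 0 ≤ (t.map PySem.Str.len).sum := by
      apply List.sum_nonneg
      intro x hx
      obtain ⟨z, hz, rfl⟩ := List.mem_map.mp hx
      exact pvLen_nonneg z
    simp only [pvKey, List.map_cons, List.sum_cons]
    omega

-- the loop invariant: B's state mirrors A's state through pvRunBest/pvKey
theorem pvRunBest_snd_nonneg (segs : List (List String)) : 0 ≤ (pvRunBest segs).2 := by
  have : ∀ (l : List (List String)) (p : List String × Int), 0 ≤ p.2 →
      0 ≤ (List.foldl pvBestStep p l).2 := by
    intro l
    induction l with
    | nil => intro p hp; exact hp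
    | cons s t iht =>
      intro p hp
      simp only [List.foldl_cons, pvBestStep]
      split
      · exact iht _ (le_of_lt (lt_of_le_of_lt hp (by assumption)))
      · exact iht _ hp
  exact this segs ([], 0) (le_refl 0)

-- the loop invariant: B's state mirrors A's state through pvRunBest/pvKey
theorem pvLoop_inv (ls : List String) :
    ∀ (segs : List (List String)) (cur : List String),
    (∀ x ∈ cur, 1 ≤ PySem.Str.len x) →
    (∀ s ∈ segs, 1 ≤ pvKey s) →
    (∀ x ∈ (List.foldl pvStepA (segs, cur) (ls.map PySem.Str.strip)).2, 1 ≤ PySem.Str.len x) ∧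
    (∀ s ∈ (List.foldl pvStepA (segs, cur) (ls.map PySem.Str.strip)).1, 1 ≤ pvKey s) ∧
    List.foldl pvStepB ((pvRunBest segs).1, (pvRunBest segs).2, cur, pvKey cur) ls =
      ((pvRunBest (List.foldl pvStepA (segs, cur) (ls.map PySem.Str.strip)).1).1,
       (pvRunBest (List.foldl pvStepA (segs, cur) (ls.map PySem.Str.strip)).1).2,
       (List.foldl pvStepA (segs, cur) (ls.map PySem.Str.strip)).2,
       pvKey (List.foldl pvStepA (segs, cur) (ls.map PySem.Str.strip)).2) := by
  induction ls with
  | nil => intro segs cur hcur hsegs; exact ⟨hcur, hsegs, rfl⟩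
  | cons raw t ih =>
    intro segs cur hcur hsegs
    simp only [List.map_cons, List.foldl_cons]
    by_cases hbd : (PySem.Str.len (PySem.Str.strip raw) == 0
        || pvSkipPrefixesA.any (fun pfx => PySem.Str.startswith (PySem.Str.strip raw) pfx)) = true
    · -- boundary line: A closes `current` (if nonempty), B closes via comparison
      by_cases hce : cur.isEmpty
      · -- current is empty: both states are unchanged (modulo the harmless reset)
        obtain rfl : cur = [] := by
          cases cur with
          | nil => rfl
          | cons a b => simp [List.isEmpty] at hce
        have hA : pvStepA (segs, []) (PySem.Str.strip raw) = (segs, []) := by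
          simp only [pvStepA]
          rw [if_pos hbd]
          rfl
        have hbl : 0 ≤ (pvRunBest segs).2 := pvRunBest_snd_nonneg segs
        have hlt : ¬ (pvKey ([] : List String) > (pvRunBest segs).2) := by
          have h0 : pvKey ([] : List String) = 0 := rfl
          omega
        have hB : pvStepB ((pvRunBest segs).1, (pvRunBest segs).2, [], pvKey ([] : List String)) raw =
            ((pvRunBest segs).1, (pvRunBest segs).2, [], pvKey ([] : List String)) := by
          simp only [pvStepB, pvSkips_eq]
          rw [if_pos hbd, if_neg hlt]
          rfl
        rw [hB, hA]
        exact ih segs [] hcur hsegs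
      · -- current is nonempty: A appends it; B folds it into the running best
        have hA : pvStepA (segs, cur) (PySem.Str.strip raw) = (segs ++ [cur], []) := by
          simp only [pvStepA]
          rw [if_pos hbd, if_neg (by simp [hce])]
        have hkc : 1 ≤ pvKey cur := pvKey_pos cur hce hcur
        have hrb : pvRunBest (segs ++ [cur]) =
            pvBestStep ((pvRunBest segs).1, (pvRunBest segs).2) cur := by
          simp [pvRunBest, List.foldl_append]
        have hB : pvStepB ((pvRunBest segs).1, (pvRunBest segs).2, cur, pvKey cur) raw =
            ((pvRunBest (segs ++ [cur])).1, (pvRunBest (segs ++ [cur])).2, [], 0) := by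
          rw [hrb]
          simp only [pvStepB, pvSkips_eq, pvBestStep]
          rw [if_pos hbd]
          by_cases hcmp : pvKey cur > (pvRunBest segs).2
          · simp only [if_pos hcmp]
          · simp only [if_neg hcmp]
        rw [hB, hA]
        have hsegs' : ∀ s ∈ segs ++ [cur], 1 ≤ pvKey s := by
          intro s hs
          rcases List.mem_append.mp hs with h | h
          · exact hsegs s h
          · simp at h; subst h; exact hkc
        have := ih (segs ++ [cur]) [] (by intro x hx; simp at hx) hsegs'
        simpa using this
    · -- content line: both append the stripped line to `current`
      have hln1 : 1 ≤ PySem.Str.len (PySem.Str.strip raw) := by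
        have h0 : ¬ (PySem.Str.len (PySem.Str.strip raw) == 0) = true := by
          intro h; exact hbd (by simp only [h, Bool.true_or])
        have := pvLen_nonneg (PySem.Str.strip raw)
        simp only [beq_iff_eq] at h0
        omega
      have hA : pvStepA (segs, cur) (PySem.Str.strip raw) =
          (segs, cur ++ [PySem.Str.strip raw]) := by
        simp only [pvStepA]
        rw [if_neg hbd]
      have hB : pvStepB ((pvRunBest segs).1, (pvRunBest segs).2, cur, pvKey cur) raw =
          ((pvRunBest segs).1, (pvRunBest segs).2, cur ++ [PySem.Str.strip raw],
            pvKey (cur ++ [PySem.Str.strip raw])) := by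
        simp only [pvStepB, pvSkips_eq]
        rw [if_neg hbd, pvKey_append]
      rw [hB, hA]
      have hcur' : ∀ x ∈ cur ++ [PySem.Str.strip raw], 1 ≤ PySem.Str.len x := by
        intro x hx
        rcases List.mem_append.mp hx with h | h
        · exact hcur x h
        · simp at h; subst h; exact hln1
      exact ih segs (cur ++ [PySem.Str.strip raw]) hcur' hsegs

-- Python's max (first maximum) agrees with the running best for positive keys
theorem pvBestStep_eq_if (m s : List String) :
    pvBestStep (m, pvKey m) s =
      (if pvKey m < pvKey s then s else m, pvKey (if pvKey m < pvKey s then s else m)) := by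
  by_cases h : pvKey m < pvKey s
  · simp [pvBestStep, h]
  · simp [pvBestStep, h]

theorem pvMaxCons (m s : List String) (t : List (List String)) :
    PySem.List.max? (m :: s :: t) (fun seg => ((seg.map PySem.Str.len).sum : Int)) =
      PySem.List.max? ((if pvKey m < pvKey s then s else m) :: t)
        (fun seg => ((seg.map PySem.Str.len).sum : Int)) := by
  simp only [PySem.List.max?, List.foldl_cons]
  by_cases h : pvKey m < pvKey s
  · have h' : (List.map PySem.Str.len m).sum < (List.map PySem.Str.len s).sum := h
    simp [h, h']
  · have h' : ¬ (List.map PySem.Str.len m).sum < (List.map PySem.Str.len s).sum := h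
    simp [h, h']

theorem pvMaxAux (rest : List (List String)) :
    ∀ m : List String,
    PySem.List.max? (m :: rest) (fun seg => ((seg.map PySem.Str.len).sum : Int)) =
      some (List.foldl pvBestStep (m, pvKey m) rest).1 := by
  induction rest with
  | nil => intro m; rfl
  | cons s t ih =>
    intro m
    rw [pvMaxCons, ih (if pvKey m < pvKey s then s else m)]
    rw [List.foldl_cons, pvBestStep_eq_if]

theorem pvMaxFirst (segs : List (List String)) (h : ∀ s ∈ segs, 1 ≤ pvKey s)
    (hne : ¬ segs.isEmpty) :
    PySem.List.max? segs (fun seg => ((seg.map PySem.Str.len).sum : Int)) =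
      some (pvRunBest segs).1 := by
  cases segs with
  | nil => simp at hne
  | cons s1 rest =>
    have h1 : 1 ≤ pvKey s1 := h s1 (by simp)
    have hfirst : pvBestStep ([], 0) s1 = (s1, pvKey s1) := by
      simp only [pvBestStep]
      rw [if_pos (by omega)]
    rw [pvMaxAux rest s1]
    simp only [pvRunBest, List.foldl_cons, hfirst]

theorem pvAlt_empty : extract_generation_text_from_mlx_vlm_output_py_alt "" = "" := by decide

-- ===== VERDICT (by name: the statement is the Claim_ definition above) =====
theorem extract_generation_text_from_mlx_vlm_output_py_spec : Claim_equal_extract_generation_text_from_mlx_vlm_output_py := by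
  intro output _
  unfold Spec_extract_generation_text_from_mlx_vlm_output_py
  unfold extract_generation_text_from_mlx_vlm_output_py
  by_cases h0 : (PySem.Str.len output == 0) = true
  · -- empty string: A returns "" early; B folds over no lines
    have htl : output.toList = [] := by
      simp only [beq_iff_eq, PySem.Str.len_eq] at h0
      exact List.length_eq_zero_iff.mp (by exact_mod_cast h0)
    have : output = "" := by simpa using congrArg String.ofList htl
    rw [if_pos h0, this, pvAlt_empty]
  · rw [if_neg h0]
    unfold extract_generation_text_from_mlx_vlm_output_py_alt
    obtain ⟨hcurF, hsegsF, hB⟩ := pvLoop_inv (PySem.Str.splitlines output) [] []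
      (by intro x hx; simp at hx) (by intro s hs; simp at hs)
    have hinit : pvRunBest ([] : List (List String)) = ([], 0) := rfl
    have hinit' : pvKey ([] : List String) = 0 := rfl
    rw [hinit, hinit'] at hB
    set stA := List.foldl pvStepA ([], [])
      ((PySem.Str.splitlines output).map PySem.Str.strip) with hstA
    simp only [hB]
    -- B's final best equals the running best over A's final segment list
    have hbest : (if pvKey stA.2 > (pvRunBest stA.1).2 then stA.2 else (pvRunBest stA.1).1) =
        (pvRunBest (if stA.2.isEmpty then stA.1 else stA.1 ++ [stA.2])).1 := by
      by_cases hce : stA.2.isEmpty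
      · have hcur0 : pvKey stA.2 = 0 := by
          cases hl : stA.2 with
          | nil => rfl
          | cons a b => rw [hl] at hce; simp [List.isEmpty] at hce
        have hbl : 0 ≤ (pvRunBest stA.1).2 := pvRunBest_snd_nonneg stA.1
        rw [if_neg (by omega), if_pos hce]
      · rw [if_neg hce]
        have : pvRunBest (stA.1 ++ [stA.2]) =
            pvBestStep ((pvRunBest stA.1).1, (pvRunBest stA.1).2) stA.2 := by
          simp [pvRunBest, List.foldl_append]
        rw [this]
        simp only [pvBestStep]
        by_cases hcmp : pvKey stA.2 > (pvRunBest stA.1).2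
        · simp [hcmp]
        · simp [hcmp]
    rw [hbest]
    set segsF := if stA.2.isEmpty then stA.1 else stA.1 ++ [stA.2] with hsegsFdef
    by_cases hse : segsF.isEmpty
    · rw [if_pos hse]
      have : segsF = [] := by
        cases hl : segsF with
        | nil => rfl
        | cons a b => rw [hl] at hse; simp [List.isEmpty] at hse
      rw [this]
      decide
    · rw [if_neg hse]
      have hall : ∀ s ∈ segsF, 1 ≤ pvKey s := by
        intro s hs
        rw [hsegsFdef] at hs
        by_cases hce : stA.2.isEmpty
        · rw [if_pos hce] at hs; exact hsegsF s hs
        · rw [if_neg hce] at hs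
          rcases List.mem_append.mp hs with h | h
          · exact hsegsF s h
          · simp at h; subst h; exact pvKey_pos stA.2 hce hcurF
      rw [pvMaxFirst segsF hall hse]
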